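-- pv_equiv track=rewrite | github.com/crissalves/redesATV | A2/Parte4/cenario.py | calcular_crc_manual
-- ===== SOURCE A (Python) =====
-- def xor_bits(a, b):
--     resultado = ""
--     for i in range(len(a)):
--         if a[i] == b[i]:
--             resultado += '0'
--         else:
--             resultado += '1'
--     return resultado
--
-- def calcular_crc_manual(dados_bits: str, gerador_bits: str) -> str:
--     n = len(gerador_bits)
--     r = n - 1
--     mensagem_aumentada = list(dados_bits + '0' * r)
--     for i in range(len(dados_bits)):
--         if mensagem_aumentada[i] == '1':
--             janela_atual = "".join(mensagem_aumentada[i : i + n])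
--             resultado_xor = xor_bits(janela_atual, gerador_bits)
--             for j in range(n):
--                 mensagem_aumentada[i + j] = resultado_xor[j]
--     resto = "".join(mensagem_aumentada[-r:])
--     return resto
-- ===== SOURCE B (Python) =====
-- def calcular_crc_manual(dados_bits: str, gerador_bits: str) -> str:
--     # Streaming LFSR-style division: one pass, an r-char shift register instead of
--     # the full augmented array with per-pivot slicing/joining.
--     n = len(gerador_bits)
--     if n <= 1:
--         # degenerate generator: the remainder has n-1 (= 0) digits
--         return ""
--     reg = []
--     for c in dados_bits + '0' * (n - 1):
--         reg.append(c)
--         if len(reg) == n: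
--             if reg[0] == '1':
--                 reg = ['0' if x == y else '1' for x, y in zip(reg, gerador_bits)]
--             reg.pop(0)
--     return "".join(reg)
-- ===== Notes on version B (the rewrite author's own statement) =====
-- stated objective: alternative
-- what changed: Replaces the augmented-message array with per-pivot slicing, string-joining and index write-back by a single streaming pass that maintains only an (n-1)-char shift register, appending each incoming char and XOR-reducing against the generator whenever the register fills; it trades A's random-access write-back for O(n-1) state and a uniform one-pass structure.
-- intended difference: For degenerate generators of length <= 1 (with a non-trivial message) A returns the whole reduced message (len(gerador)==1, via the [-0:] slice quirk) or dados_bits[1:] (empty generator), while B returns the empty string, which is the correct (n-1)-digit remainder of division by a degree-0 polynomial. — e.g. on calcular_crc_manual("1", "0"): A returns "1", B returns ""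
import Mathlib
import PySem

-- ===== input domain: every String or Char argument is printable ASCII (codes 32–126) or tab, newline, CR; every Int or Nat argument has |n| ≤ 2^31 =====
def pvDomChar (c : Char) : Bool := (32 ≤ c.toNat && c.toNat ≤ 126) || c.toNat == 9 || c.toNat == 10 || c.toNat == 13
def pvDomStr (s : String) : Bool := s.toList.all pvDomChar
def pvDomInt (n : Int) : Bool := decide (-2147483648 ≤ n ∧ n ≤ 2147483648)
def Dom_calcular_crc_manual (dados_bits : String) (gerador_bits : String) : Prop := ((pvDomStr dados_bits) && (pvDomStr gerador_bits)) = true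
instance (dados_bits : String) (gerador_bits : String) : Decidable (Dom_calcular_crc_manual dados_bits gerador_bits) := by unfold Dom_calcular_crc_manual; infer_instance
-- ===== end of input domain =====

-- B replaces A's in-place long division over the augmented message array (per-pivot
-- slicing, join and index write-back) by a single streaming pass with an (n-1)-char
-- shift register; on degenerate generators (length ≤ 1) B returns the empty remainder
-- where A returns leftover message text (see D_ below).

-- ===== PORT A =====
-- helper xor_bits: loop over range(len(a)); a[i]/b[i] are nonnegative in-range indices
-- at every call site (len a ≤ len b), so List.getD is exact there.
def xor_bits (a : List Char) (b : List Char) : List Char :=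
  (List.range a.length).foldl
    (fun resultado i =>
      if a.getD i ' ' == b.getD i ' ' then resultado ++ ['0'] else resultado ++ ['1'])
    []

-- literal port of A; the slice mensagem[i:i+n] has nonnegative clamped bounds
-- (= drop/take), list[idx] = v is List.set (indices always in range here), and the
-- final mensagem[-r:] (r may be -1, 0 or positive) is PySem.List.slice.
def calcular_crc_manual (dados_bits : String) (gerador_bits : String) : String :=
  let ger := gerador_bits.toList
  let n := ger.length
  let r : Int := (n : Int) - 1
  let mensagem0 := dados_bits.toList ++ List.replicate r.toNat '0'   -- '0' * r ("" for r < 0)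
  let mensagem := (List.range dados_bits.toList.length).foldl
    (fun mensagem i =>
      if mensagem.getD i ' ' == '1' then
        let janela := (mensagem.drop i).take n
        let resultado_xor := xor_bits janela ger
        (List.range n).foldl
          (fun m j => m.set (i + j) (resultado_xor.getD j ' ')) mensagem
      else mensagem)
    mensagem0
  String.ofList (PySem.List.slice mensagem (some (-r)) none)

-- ===== PORT B =====
-- the body of B's for-loop: append the incoming char; when the register fills to n
-- chars, XOR with the generator if the outgoing char is '1', then pop the front.
def crcStep (ger : List Char) (reg : List Char) (c : Char) : List Char :=
  let reg1 := reg ++ [c]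
  if reg1.length == ger.length then
    let reg2 :=
      if reg1.headD ' ' == '1' then
        (reg1.zip ger).map (fun p => if p.1 == p.2 then '0' else '1')
      else reg1
    reg2.drop 1   -- reg.pop(0)
  else reg1

def calcular_crc_manual_alt (dados_bits : String) (gerador_bits : String) : String :=
  let ger := gerador_bits.toList
  let n := ger.length
  if n ≤ 1 then "" else
  String.ofList ((dados_bits.toList ++ List.replicate (n - 1) '0').foldl (crcStep ger) [])

-- ===== PRECONDITION & SPEC =====
-- For degenerate generators of length ≤ 1 (with a non-trivial message) A returns the
-- whole reduced message (len 1, via the [-0:] slice quirk) or dados_bits[1:] (empty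
-- generator), while B returns "", the correct (n-1)-digit remainder of division by a
-- degree-0 polynomial.
def D_calcular_crc_manual (dados_bits : String) (gerador_bits : String) : Prop :=
  (gerador_bits.toList.length = 1 ∧ 1 ≤ dados_bits.toList.length) ∨
  (gerador_bits.toList.length = 0 ∧ 2 ≤ dados_bits.toList.length)
instance (dados_bits : String) (gerador_bits : String) : Decidable (D_calcular_crc_manual dados_bits gerador_bits) := by unfold D_calcular_crc_manual; infer_instance

def Spec_calcular_crc_manual (dados_bits : String) (gerador_bits : String) (out : String) : Prop := ¬ D_calcular_crc_manual dados_bits gerador_bits → out = calcular_crc_manual_alt dados_bits gerador_bits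
instance (dados_bits : String) (gerador_bits : String) (out : String) : Decidable (Spec_calcular_crc_manual dados_bits gerador_bits out) := by unfold Spec_calcular_crc_manual; infer_instance

def pvDiffWitness_calcular_crc_manual : String × String := ("1", "0")
def pvDiffWitnessOut_calcular_crc_manual : String × String := ("1", "")

-- ===== CLAIM (what is proved, stated in full; the proofs are below) =====
def Claim_unchanged_calcular_crc_manual : Prop := ∀ (dados_bits : String) (gerador_bits : String), Dom_calcular_crc_manual dados_bits gerador_bits → Spec_calcular_crc_manual dados_bits gerador_bits (calcular_crc_manual dados_bits gerador_bits)
def Claim_changed_calcular_crc_manual : Prop := Dom_calcular_crc_manual (pvDiffWitness_calcular_crc_manual.1) (pvDiffWitness_calcular_crc_manual.2) ∧ D_calcular_crc_manual (pvDiffWitness_calcular_crc_manual.1) (pvDiffWitness_calcular_crc_manual.2) ∧ calcular_crc_manual (pvDiffWitness_calcular_crc_manual.1) (pvDiffWitness_calcular_crc_manual.2) = pvDiffWitnessOut_calcular_crc_manual.1 ∧ calcular_crc_manual_alt (pvDiffWitness_calcular_crc_manual.1) (pvDiffWitness_calcular_crc_manual.2) = pvDiffWitnessOut_calcular_crc_manual.2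 ∧ pvDiffWitnessOut_calcular_crc_manual.1 ≠ pvDiffWitnessOut_calcular_crc_manual.2
def Claim_exact_calcular_crc_manual : Prop := ∀ (dados_bits : String) (gerador_bits : String), Dom_calcular_crc_manual dados_bits gerador_bits → D_calcular_crc_manual dados_bits gerador_bits → calcular_crc_manual dados_bits gerador_bits ≠ calcular_crc_manual_alt dados_bits gerador_bits

-- ===== LEMMAS AND PROOFS =====

def xorMap (ger : List Char) (w : List Char) : List Char :=
  (w.zip ger).map (fun p => if p.1 == p.2 then '0' else '1')

theorem xor_bits_eq (a b : List Char) (h : a.length ≤ b.length) :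
    xor_bits a b = xorMap b a := by
  unfold xor_bits xorMap
  have h1 : (fun (resultado : List Char) (i : Nat) =>
      if a.getD i ' ' == b.getD i ' ' then resultado ++ ['0'] else resultado ++ ['1'])
      = fun resultado i => resultado ++ [if a.getD i ' ' == b.getD i ' ' then '0' else '1'] := by
    funext res i; split <;> rfl
  rw [h1, PySem.List.foldl_append_singleton_eq_map]
  apply List.ext_getElem
  · simp [Nat.min_eq_left h]
  · intro i hi1 hi2
    simp at hi1
    simp only [List.nil_append, List.getElem_map, List.getElem_range, List.getElem_zip,
      List.getD_eq_getElem _ _ hi1, List.getD_eq_getElem _ _ (lt_of_lt_of_le hi1 h)]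

theorem writeback (res m : List Char) (i : Nat) : ∀ (n : Nat), n ≤ res.length → i + n ≤ m.length →
    (List.range n).foldl (fun m j => m.set (i + j) (res.getD j ' ')) m
      = m.take i ++ res.take n ++ m.drop (i + n) := by
  intro n
  induction n with
  | zero => simp
  | succ n ih =>
    intro hn hm
    rw [List.range_succ, List.foldl_append, ih (by omega) (by omega)]
    simp only [List.foldl_cons, List.foldl_nil]
    have hlen : (m.take i ++ res.take n).length = i + n := by
      simp; omega
    have hdrop : m.drop (i + n) = m[i+n] :: m.drop (i + n + 1) :=
      List.drop_eq_getElem_cons (by omega)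
    rw [List.append_assoc, ← List.append_assoc (m.take i)]
    rw [List.set_append_right _ _ (by omega), hlen]
    simp only [Nat.sub_self, hdrop, List.set_cons_zero]
    rw [show i + (n+1) = i + n + 1 by omega,
      List.getD_eq_getElem res ' ' (show n < res.length by omega)]
    have htake : List.take (n+1) res = List.take n res ++ [res[n]] := by
      rw [List.take_add_one, List.getElem?_eq_getElem (show n < res.length by omega)]
      simp
    rw [htake]
    simp only [List.append_assoc, List.singleton_append]
    rfl

theorem length_xorMap (ger w : List Char) : (xorMap ger w).length = min w.length ger.length := by
  simp [xorMap]

theorem length_crcStep (ger reg : List Char) (c : Char) (h : reg.length + 1 = ger.length) :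
    (crcStep ger reg c).length = reg.length := by
  unfold crcStep
  simp only [List.length_append, List.length_cons, List.length_nil]
  rw [if_pos (by simp; omega)]
  split
  · simp; omega
  · simp

theorem crcStep_fill (ger : List Char) :
    ∀ (ys reg : List Char), reg.length + ys.length < ger.length →
      ys.foldl (crcStep ger) reg = reg ++ ys := by
  intro ys
  induction ys with
  | nil => simp
  | cons y ys ih =>
    intro reg h
    simp only [List.length_cons] at h
    simp only [List.foldl_cons]
    have hstep : crcStep ger reg y = reg ++ [y] := by
      unfold crcStep
      rw [if_neg (by simp; omega)]
    rw [hstep, ih _ (by simp at h ⊢; omega)]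
    simp

theorem crcStep_len_inv (ger : List Char) (_hg : 2 ≤ ger.length) :
    ∀ (ys reg : List Char), reg.length + 1 = ger.length →
      (ys.foldl (crcStep ger) reg).length + 1 = ger.length := by
  intro ys
  induction ys with
  | nil => simp
  | cons y ys ih =>
    intro reg h
    simp only [List.foldl_cons]
    exact ih _ (by rw [length_crcStep ger reg y h]; omega)

theorem main_inv (ger : List Char) (hg : 2 ≤ ger.length) :
    ∀ (ts p q : List Char), q.length + 1 = ger.length →
    ∃ p' : List Char, p'.length = p.length + ts.length ∧
      (List.range' p.length ts.length).foldl
        (fun mensagem i =>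
          if mensagem.getD i ' ' == '1' then
            (List.range ger.length).foldl
              (fun m j => m.set (i + j)
                ((xor_bits ((mensagem.drop i).take ger.length) ger).getD j ' ')) mensagem
          else mensagem)
        (p ++ q ++ ts)
      = p' ++ ts.foldl (crcStep ger) q := by
  intro ts
  induction ts with
  | nil => intro p q hq; exact ⟨p, by simp, by simp⟩
  | cons x ts ih =>
    intro p q hq
    cases q with
    | nil => simp at hq; omega
    | cons c q'' =>
      simp only [List.length_cons] at hq
      simp only [List.length_cons, List.range'_succ, List.foldl_cons]
      have hget : (p ++ (c :: q'') ++ x :: ts).getD p.length ' ' = c := by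
        rw [List.append_assoc, List.getD_append_right p _ ' ' p.length (by omega)]
        simp
      rw [hget]
      by_cases hc : c = '1'
      · rw [if_pos (by simp [hc])]
        have hjan : ((p ++ (c :: q'') ++ x :: ts).drop p.length).take ger.length
            = (c :: q'') ++ [x] := by
          rw [List.append_assoc, List.drop_left]
          rw [List.take_append]
          simp only [List.length_cons]
          rw [show ger.length - (q''.length + 1) = 1 by omega,
            List.take_of_length_le (by simp; omega)]
          simp
        rw [hjan]
        set w := xor_bits ((c :: q'') ++ [x]) ger with hw
        have hwlen : w.length = ger.length := by
          rw [hw, xor_bits_eq _ _ (by simp; omega), length_xorMap]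
          simp; omega
        have hwb := writeback w (p ++ (c :: q'') ++ x :: ts) p.length ger.length
          (by omega) (by simp; omega)
        rw [hwb]
        have h1 : (p ++ (c :: q'') ++ x :: ts).take p.length = p := by
          rw [List.append_assoc, List.take_left]
        have h2 : w.take ger.length = w := List.take_of_length_le (by omega)
        have h3 : (p ++ (c :: q'') ++ x :: ts).drop (p.length + ger.length) = ts := by
          rw [show p ++ (c :: q'') ++ x :: ts = (p ++ (c :: q'') ++ [x]) ++ ts by simp,
            show p.length + ger.length = (p ++ (c :: q'') ++ [x]).length by simp; omega,
            List.drop_left]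
        rw [h1, h2, h3]
        have hwne : w ≠ [] := by intro h; rw [h] at hwlen; simp at hwlen; omega
        obtain ⟨d, w', hdw⟩ := List.exists_cons_of_ne_nil hwne
        have hstep : crcStep ger (c :: q'') x = w' := by
          unfold crcStep
          rw [if_pos (by simp; omega)]
          simp only [List.cons_append, List.headD_cons]
          rw [if_pos (by simp [hc])]
          have hzip : ((c :: (q'' ++ [x])).zip ger).map (fun p => if p.1 == p.2 then '0' else '1') = w := by
            rw [hw, xor_bits_eq _ _ (by simp; omega)]
            simp [xorMap]
          rw [hzip, hdw]
          simp
        obtain ⟨p', hp1, hp2⟩ := ih (p ++ [d]) w'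
          (by have h5 := hwlen; rw [hdw] at h5; simp at h5 ⊢; omega)
        refine ⟨p', by simp at hp1 ⊢; omega, ?_⟩
        rw [hstep]
        rw [← hp2, hdw]
        simp
      · rw [if_neg (by simp [hc])]
        have hstep : crcStep ger (c :: q'') x = q'' ++ [x] := by
          unfold crcStep
          rw [if_pos (by simp; omega)]
          simp only [List.cons_append, List.headD_cons]
          rw [if_neg (by simp [hc])]
          simp
        obtain ⟨p', hp1, hp2⟩ := ih (p ++ [c]) (q'' ++ [x]) (by simp; omega)
        refine ⟨p', by simp at hp1 ⊢; omega, ?_⟩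
        rw [hstep, ← hp2]
        simp

theorem main_case (d g : String) (hg : 2 ≤ g.toList.length) :
    calcular_crc_manual d g = calcular_crc_manual_alt d g := by
  simp only [calcular_crc_manual, calcular_crc_manual_alt]
  rw [if_neg (by omega)]
  set G := g.toList with hG
  set D := d.toList with hD
  set n := G.length with hn
  set r := n - 1 with hr
  have hcast : ((n : Int) - 1).toNat = r := by omega
  rw [hcast]
  set S0 := D ++ List.replicate r '0' with hS0
  have hS0len : S0.length = D.length + r := by simp [hS0]
  have htklen : (S0.take r).length + 1 = n := by
    simp [hS0]; omega
  have hdplen : (S0.drop r).length = D.length := by simp [hS0]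
  -- A's loop
  obtain ⟨p', hp1, hp2⟩ := main_inv G hg (S0.drop r) [] (S0.take r) (by omega)
  simp only [List.nil_append, List.length_nil, List.take_append_drop, hdplen, ← hn] at hp2
  rw [← List.range_eq_range'] at hp2
  simp only [List.length_nil, hdplen, Nat.zero_add] at hp1
  rw [hp2]
  -- the final register
  set R := (S0.drop r).foldl (crcStep G) (S0.take r) with hR
  have hRlen : R.length = r := by
    have h6 := crcStep_len_inv G hg (S0.drop r) (S0.take r) (by omega)
    rw [← hR, ← hn] at h6
    omega
  -- A's slice
  have hneg : -((n : Int) - 1) = -((r : Nat) : Int) := by omega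
  rw [hneg, PySem.List.slice_from_neg_natCast _ _ (by omega)]
  have hlen2 : (p' ++ R).length - r = p'.length := by simp; omega
  rw [hlen2, List.drop_left]
  -- B's loop
  rw [show S0 = S0.take r ++ S0.drop r by simp, List.foldl_append,
    crcStep_fill G (S0.take r) [] (by simp at htklen ⊢; omega)]
  simp
  rw [hR]

theorem setfold_length (g : Nat → Char) (i : Nat) (l : List Nat) :
    ∀ m : List Char, (l.foldl (fun m j => m.set (i + j) (g j)) m).length = m.length := by
  induction l with
  | nil => intro m; rfl
  | cons a l ih => intro m; rw [List.foldl_cons, ih]; simp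

theorem loopA_length (ger : List Char) (l : List Nat) :
    ∀ m : List Char,
      (l.foldl (fun mensagem i =>
        if mensagem.getD i ' ' == '1' then
          (List.range ger.length).foldl
            (fun m j => m.set (i + j)
              ((xor_bits ((mensagem.drop i).take ger.length) ger).getD j ' ')) mensagem
        else mensagem) m).length = m.length := by
  induction l with
  | nil => intro m; rfl
  | cons a l ih =>
    intro m
    rw [List.foldl_cons, ih]
    split
    · rw [setfold_length]
    · rfl

theorem loopA_nil_gen (l : List Nat) :
    ∀ m : List Char,
      l.foldl (fun mensagem i =>
        if mensagem.getD i ' ' == '1' then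
          (List.range (List.length ([] : List Char))).foldl
            (fun m j => m.set (i + j)
              ((xor_bits ((mensagem.drop i).take (List.length ([] : List Char))) ([] : List Char)).getD j ' ')) mensagem
        else mensagem) m = m := by
  induction l with
  | nil => intro m; rfl
  | cons a l ih =>
    intro m
    rw [List.foldl_cons]
    have h : (if (m.getD a ' ' == '1') = true then
        List.foldl (fun m_1 j => m_1.set (a + j)
          ((xor_bits (List.take (List.length ([] : List Char)) (List.drop a m)) ([] : List Char)).getD j ' ')) m
          (List.range (List.length ([] : List Char)))
      else m) = m := by
      split <;> rfl
    rw [h, ih]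


theorem alt_deg (d g : String) (hg : g.toList.length ≤ 1) :
    calcular_crc_manual_alt d g = "" := by
  simp only [calcular_crc_manual_alt]
  rw [if_pos hg]

theorem A_n1_toList (d g : String) (hg1 : g.toList.length = 1) :
    (calcular_crc_manual d g).toList.length = d.toList.length := by
  simp only [calcular_crc_manual]
  rw [show -((g.toList.length : Int) - 1) = ((0 : Nat) : Int) by rw [hg1]; norm_num]
  rw [PySem.List.slice_from_natCast]
  rw [String.toList_ofList]
  simp only [List.drop_zero]
  rw [loopA_length g.toList]
  simp [hg1]

theorem A_n0_val (d g : String) (hg0 : g.toList.length = 0) :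
    calcular_crc_manual d g = String.ofList d.toList.tail := by
  have hG : g.toList = [] := List.length_eq_zero_iff.mp hg0
  simp only [calcular_crc_manual, hG]
  rw [show (((List.length ([] : List Char)) : Int) - 1).toNat = 0 by simp]
  rw [show List.replicate 0 '0' = ([] : List Char) from rfl, List.append_nil]
  rw [loopA_nil_gen]
  rw [show -(((List.length ([] : List Char)) : Int) - 1) = (1 : Int) by simp]
  rw [show (1 : Int) = ((1 : Nat) : Int) from rfl, PySem.List.slice_from_natCast]
  rw [show d.toList.drop 1 = d.toList.tail from List.drop_one]

-- ===== VERDICT (by name: the statement is the Claim_ definition above) =====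
theorem calcular_crc_manual_spec : Claim_unchanged_calcular_crc_manual := by
  unfold Claim_unchanged_calcular_crc_manual
  intro d g _hdom hnd
  by_cases h2 : 2 ≤ g.toList.length
  · exact main_case d g h2
  · unfold D_calcular_crc_manual at hnd
    interval_cases h : g.toList.length
    · -- empty generator, message of length ≤ 1
      have hd1 : d.toList.length ≤ 1 := by
        by_contra hc; exact hnd (Or.inr ⟨rfl, by omega⟩)
      rw [A_n0_val d g h, alt_deg d g (by omega)]
      have : d.toList.tail = [] := by
        cases hl : d.toList with
        | nil => rfl
        | cons a t => rw [hl] at hd1; simp at hd1; simp [hd1]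
      rw [this]
    · -- generator of length 1, empty message
      have hd0 : d.toList.length = 0 := by
        by_contra hc; exact hnd (Or.inl ⟨rfl, by omega⟩)
      rw [alt_deg d g (by omega)]
      have hA := A_n1_toList d g h
      rw [hd0] at hA
      have hnil : (calcular_crc_manual d g).toList = [] := List.length_eq_zero_iff.mp hA
      calc calcular_crc_manual d g
          = String.ofList (calcular_crc_manual d g).toList := String.ofList_toList.symm
        _ = "" := by rw [hnil]

theorem calcular_crc_manual_changed : Claim_changed_calcular_crc_manual := by
  unfold Claim_changed_calcular_crc_manual; decide

theorem calcular_crc_manual_tight : Claim_exact_calcular_crc_manual := by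
  unfold Claim_exact_calcular_crc_manual
  intro d g _hdom hd
  unfold D_calcular_crc_manual at hd
  intro heq
  rcases hd with ⟨hg1, hd1⟩ | ⟨hg0, hd2⟩
  · rw [alt_deg d g (by omega)] at heq
    have hA := A_n1_toList d g hg1
    rw [heq] at hA
    have h0 : ("" : String).toList.length = 0 := rfl
    omega
  · rw [A_n0_val d g hg0, alt_deg d g (by omega)] at heq
    have : d.toList.tail = [] := by
      have := congrArg String.toList heq
      rw [String.toList_ofList] at this
      simpa using this
    have hlen : d.toList.tail.length = 0 := by rw [this]; rfl
    rw [List.length_tail] at hlen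
    omega
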